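-- pv_equiv track=rewrite | github.com/FedericoCanaliII/SectionCHECK | struttura/testo_struttura.py | _tokenize_with_pos
-- ===== SOURCE A (Python) =====
-- def _tokenize_with_pos(line: str) -> list:
--     """Come _tokenize ma restituisce coppie (token, posizione_iniziale)."""
--     tokens = []
--     i = 0
--     n = len(line)
--     while i < n:
--         if line[i].isspace():
--             i += 1
--             continue
--         if line[i] in ('"', "'"):
--             quote = line[i]
--             j = line.find(quote, i + 1)
--             if j == -1:
--                 j = n - 1
--             tokens.append((line[i:j+1], i))
--             i = j + 1
--         else:
--             j = i
--             while j < n and not line[j].isspace():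
--                 j += 1
--             tokens.append((line[i:j], i))
--             i = j
--     return tokens
-- ===== SOURCE B (Python) =====
-- import re
--
-- _TOKEN_PAT = re.compile(r'''(['"]).*?\1|['"].*|\S+''', re.DOTALL)
--
-- def _tokenize_with_pos(line: str) -> list:
--     """Come _tokenize ma restituisce coppie (token, posizione_iniziale)."""
--     return [(m.group(), m.start()) for m in _TOKEN_PAT.finditer(line)]
-- ===== Notes on version B (the rewrite author's own statement) =====
-- stated objective: idiomatic
-- what changed: Replaces A's hand-written index/while scanner (explicit whitespace skipping, str.find for the closing quote, inner while for word ends) by a single compiled regex (quoted-span | unterminated-quote | \S+) scanned with re.finditer, emitting (match, start) pairs.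
import Mathlib
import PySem

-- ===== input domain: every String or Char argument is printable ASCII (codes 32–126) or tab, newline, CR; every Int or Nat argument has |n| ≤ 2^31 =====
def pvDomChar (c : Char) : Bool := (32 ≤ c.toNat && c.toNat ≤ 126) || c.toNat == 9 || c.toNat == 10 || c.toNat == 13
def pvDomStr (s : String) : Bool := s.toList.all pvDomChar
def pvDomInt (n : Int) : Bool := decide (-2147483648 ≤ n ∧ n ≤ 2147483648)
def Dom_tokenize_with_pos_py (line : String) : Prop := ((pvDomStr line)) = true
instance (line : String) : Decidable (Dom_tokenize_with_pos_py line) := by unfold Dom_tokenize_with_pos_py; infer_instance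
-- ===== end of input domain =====

-- B replaces A's hand-rolled index/while scanner by a single compiled regex
-- (quoted-span | unterminated-quote | \S+) scanned with finditer (objective: idiomatic).

-- ===== PORT A =====
-- inner `while j < n and not line[j].isspace(): j += 1` of A (returns the final j)
def tokA_wordEnd (cs : List Char) (j : Nat) : Nat :=
  if h : j < cs.length ∧ ¬ (PySem.Chars.isspace (cs.getD j ' ') = true) then
    tokA_wordEnd cs (j + 1)
  else j
termination_by cs.length - j
decreasing_by omega

-- the `while i < n` loop of A; `n = len(line)` is cs.length
def tokA_loop (cs : List Char) (i : Nat) (tokens : List (String × Int)) : List (String × Int) :=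
  if hi : i < cs.length then
    let c := cs.getD i ' '
    if PySem.Chars.isspace c then
      tokA_loop cs (i + 1) tokens
    else if c = '"' ∨ c = '\'' then
      -- j = line.find(quote, i + 1); if j == -1: j = n - 1
      let jI : Int := PySem.Chars.findFrom cs [c] ((i + 1 : Nat) : Int) none
      let j : Nat := if jI = -1 then cs.length - 1 else jI.toNat
      tokA_loop cs (j + 1)
        (tokens ++ [(String.ofList (PySem.List.slice cs (some (i : Int)) (some ((j + 1 : Nat) : Int))), (i : Int))])
    else
      let j : Nat := tokA_wordEnd cs i
      tokA_loop cs j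
        (tokens ++ [(String.ofList (PySem.List.slice cs (some (i : Int)) (some ((j : Nat) : Int))), (i : Int))])
  else tokens
termination_by cs.length + 1 - i
decreasing_by
  · omega
  · -- quoted branch: the next i is j + 1 > i
    split
    · omega
    · rename_i hnone
      have hspec := PySem.Chars.findFrom_natCast_spec cs [cs.getD i ' '] (i + 1) (by omega) hnone
      omega
  · -- word branch: tokA_wordEnd cs i ≥ i + 1 since cs.getD i is not a space
    rename_i hsp hq
    have h1 : tokA_wordEnd cs i = tokA_wordEnd cs (i + 1) := by
      rw [tokA_wordEnd]
      exact if_pos ⟨hi, hsp⟩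
    have h2 : ∀ j, j ≤ tokA_wordEnd cs j := by
      intro j
      fun_induction tokA_wordEnd cs j with
      | case1 j h ih => omega
      | case2 j h => omega
    have := h2 (i + 1); omega

def tokenize_with_pos_py (line : String) : List (String × Int) :=
  tokA_loop line.toList 0 []

-- ===== PORT B =====
-- length of the regex match of  (['"]).*?\1 | ['"].* | \S+  at the head of cs
-- (none: no match here — finditer moves one position right). Hand port of the
-- regex alternation, exact on the stated domain: alternative order and the
-- non-greedy `.*?` make a quoted alternative match up to the FIRST same quote.
def tokB_matchLen (cs : List Char) : Option Nat :=
  match cs with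
  | [] => none
  | c :: rest =>
    if c = '"' ∨ c = '\'' then
      match rest.idxOf? c with
      | some k => some (k + 2)            -- (['"]).*?\1
      | none   => some (rest.length + 1)  -- ['"].*   (DOTALL: to end of string)
    else if PySem.Chars.isspace c then none
    else some ((rest.takeWhile (fun d => !PySem.Chars.isspace d)).length + 1)  -- \S+

lemma tokB_matchLen_pos {cs : List Char} {len : Nat} (h : tokB_matchLen cs = some len) : 1 ≤ len := by
  unfold tokB_matchLen at h
  cases cs with
  | nil => simp at h
  | cons c rest =>
    simp only at h
    split at h
    · split at h <;> simp_all <;> omega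
    · split at h
      · simp at h
      · simp at h; omega

-- re.finditer: emit a (match, start) pair and resume after it, else step right
def tokB_scan (cs : List Char) (i : Nat) : List (String × Int) :=
  match cs with
  | [] => []
  | c :: rest =>
    match h : tokB_matchLen (c :: rest) with
    | none => tokB_scan rest (i + 1)
    | some len =>
        (String.ofList ((c :: rest).take len), (i : Int)) :: tokB_scan ((c :: rest).drop len) (i + len)
termination_by cs.length
decreasing_by
  · simp
  · have := tokB_matchLen_pos h
    simp; omega

def tokenize_with_pos_py_alt (line : String) : List (String × Int) :=
  tokB_scan line.toList 0

-- ===== PRECONDITION & SPEC =====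
def Spec_tokenize_with_pos_py (line : String) (out : List (String × Int)) : Prop := out = tokenize_with_pos_py_alt line
instance (line : String) (out : List (String × Int)) : Decidable (Spec_tokenize_with_pos_py line out) := by unfold Spec_tokenize_with_pos_py; infer_instance

-- ===== CLAIM (what is proved, stated in full; the proofs are below) =====
def Claim_equal_tokenize_with_pos_py : Prop := ∀ (line : String), Dom_tokenize_with_pos_py line → Spec_tokenize_with_pos_py line (tokenize_with_pos_py line)

-- ===== LEMMAS AND PROOFS =====

-- Chars.find with a one-character needle is the first index of that character
lemma find_single (l : List Char) (q : Char) :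
    PySem.Chars.find l [q] = (l.idxOf? q).elim (-1) (fun k => (k : Int)) := by
  have go : ∀ (t : List Char) (k : Nat), PySem.Chars.find.go [q] t k =
      (t.idxOf? q).elim (-1) (fun m => ((k + m : Nat) : Int)) := by
    intro t
    induction t with
    | nil => intro k; simp [PySem.Chars.find.go]
    | cons h t ih =>
      intro k
      rw [PySem.Chars.find.go]
      by_cases hqh : h = q
      · subst hqh; simp [List.idxOf?_cons, List.isPrefixOf]
      · have h1 : ((h :: t).idxOf? q) = (t.idxOf? q).map (· + 1) := by
          simp [List.idxOf?_cons, hqh]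
        have h2 : ([q].isPrefixOf (h :: t)) = false := by
          simp [List.isPrefixOf]; exact fun h' => absurd h'.symm hqh
        rw [h2, h1, ih (k + 1)]
        cases hidx : t.idxOf? q with
        | none => simp
        | some m => simp; ring
  simp only [PySem.Chars.find, go l 0]
  cases l.idxOf? q <;> simp

-- A's inner word loop measured from position i
lemma wordEnd_eq (cs : List Char) (i : Nat) :
    tokA_wordEnd cs i = i + ((cs.drop i).takeWhile (fun d => !PySem.Chars.isspace d)).length := by
  fun_induction tokA_wordEnd cs i with
  | case1 j h ih =>
    obtain ⟨hj, hs⟩ := h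
    rw [List.drop_eq_getElem_cons hj, List.takeWhile_cons_of_pos
      (by simp [List.getElem?_eq_getElem hj] at hs; simp [hs])]
    rw [ih]; simp; omega
  | case2 j h =>
    by_cases hj : j < cs.length
    · have hs : PySem.Chars.isspace (cs.getD j ' ') = true := by
        by_contra hc; exact h ⟨hj, hc⟩
      rw [List.drop_eq_getElem_cons hj, List.takeWhile_cons_of_neg
        (by simp [List.getElem?_eq_getElem hj] at hs; simp [hs])]
      simp
    · rw [List.drop_eq_nil_iff.mpr (by omega)]; simp

-- the main loop invariant: A's loop from i = acc ++ B's scan of the suffix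
lemma loop_eq (m : Nat) : ∀ (cs : List Char) (i : Nat) (acc : List (String × Int)),
    cs.length ≤ i + m → i ≤ cs.length →
    tokA_loop cs i acc = acc ++ tokB_scan (cs.drop i) i := by
  induction m with
  | zero =>
    intro cs i acc hm hi
    have hlen : i = cs.length := by omega
    rw [tokA_loop, dif_neg (by omega), hlen, List.drop_length, tokB_scan]
    simp
  | succ m ih =>
    intro cs i acc hm hi
    by_cases hlt : i < cs.length
    · rw [tokA_loop, dif_pos hlt]
      dsimp only
      have hdrop : cs.drop i = cs.getD i ' ' :: cs.drop (i + 1) := by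
        rw [List.drop_eq_getElem_cons hlt, List.getD_eq_getElem _ _ hlt]
      by_cases hsp : PySem.Chars.isspace (cs.getD i ' ') = true
      · -- whitespace: A skips, B's regex has no match here and steps right
        rw [if_pos hsp, ih cs (i + 1) acc (by omega) (by omega), hdrop, tokB_scan]
        have hq : ¬(cs.getD i ' ' = '"' ∨ cs.getD i ' ' = '\'') := by
          rintro (he | he) <;> rw [he] at hsp <;> exact absurd hsp (by decide)
        split
        next heq => rfl
        next len heq =>
          rw [tokB_matchLen, if_neg hq, if_pos hsp] at heq
          exact absurd heq (by simp)
      · rw [if_neg hsp]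
        by_cases hqc : cs.getD i ' ' = '"' ∨ cs.getD i ' ' = '\''
        · -- quoted token
          rw [if_pos hqc]
          cases hidx : (cs.drop (i + 1)).idxOf? (cs.getD i ' ') with
          | some k =>
            have hk : k < (cs.drop (i + 1)).length := by
              obtain ⟨h1, -, -⟩ := List.idxOf?_eq_some_iff.mp hidx
              exact h1
            have hklen : i + 1 + k < cs.length := by
              rw [List.length_drop] at hk; omega
            have hfr : PySem.Chars.findFrom cs [cs.getD i ' '] ((i + 1 : Nat) : Int) none
                = ((i + 1 + k : Nat) : Int) := by
              rw [PySem.Chars.findFrom_natCast cs _ (i + 1) hlt, find_single, hidx,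
                Option.elim_some]
              rw [if_neg (by omega)]
              push_cast; ring
            rw [hfr]
            rw [if_neg (by omega), Int.toNat_natCast]
            rw [ih cs (i + 1 + k + 1) _ (by omega) (by omega)]
            rw [hdrop, tokB_scan]
            split
            next heq =>
              rw [tokB_matchLen, if_pos hqc, hidx] at heq
              exact absurd heq (by simp)
            next len heq =>
              rw [tokB_matchLen, if_pos hqc, hidx] at heq
              have hlen2 : len = k + 2 := by
                simpa using heq.symm
              subst hlen2
              rw [PySem.List.slice_natCast cs i (i + 1 + k + 1)]
              rw [← hdrop, List.drop_drop]
              have h1 : i + 1 + k + 1 - i = k + 2 := by omega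
              have h2 : i + 1 + k + 1 = i + (k + 2) := by omega
              rw [h1, h2]
              simp
          | none =>
            have hfr : PySem.Chars.findFrom cs [cs.getD i ' '] ((i + 1 : Nat) : Int) none
                = -1 := by
              rw [PySem.Chars.findFrom_natCast cs _ (i + 1) hlt, find_single, hidx,
                Option.elim_none]
              simp
            rw [hfr, if_pos rfl]
            rw [ih cs (cs.length - 1 + 1) _ (by omega) (by omega)]
            have hLen : cs.length - 1 + 1 = cs.length := by omega
            have hnil : ∀ p : Nat, tokB_scan [] p = [] := fun p => by rw [tokB_scan]
            rw [hLen, List.drop_length, hnil, hdrop, tokB_scan]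
            split
            next heq =>
              rw [tokB_matchLen, if_pos hqc, hidx] at heq
              exact absurd heq (by simp)
            next len heq =>
              rw [tokB_matchLen, if_pos hqc, hidx] at heq
              have hlen2 : len = (cs.drop (i + 1)).length + 1 := by
                simpa using heq.symm
              subst hlen2
              rw [PySem.List.slice_natCast cs i cs.length]
              rw [← hdrop]
              have hdl : (cs.drop i).length = cs.length - i := List.length_drop ..
              have htake : (cs.drop (i + 1)).length + 1 = (cs.drop i).length := by
                rw [hdl, List.length_drop]; omega
              rw [htake, List.take_length, List.drop_length]
              have htake2 : List.take (cs.length - i) (cs.drop i) = cs.drop i := by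
                rw [← hdl, List.take_length]
              rw [htake2, tokB_scan]
              simp
        · -- ordinary word: A's inner while = B's \S+ takeWhile
          rw [if_neg hqc]
          have hw := wordEnd_eq cs i
          have hspf : PySem.Chars.isspace (cs.getD i ' ') = false :=
            Bool.eq_false_iff.mpr hsp
          have htw : (cs.drop i).takeWhile (fun d => !PySem.Chars.isspace d) =
              cs.getD i ' ' :: (cs.drop (i + 1)).takeWhile (fun d => !PySem.Chars.isspace d) := by
            rw [hdrop, List.takeWhile_cons]
            simp only [hspf]
            simp
          have htl_le : ((cs.drop i).takeWhile (fun d => !PySem.Chars.isspace d)).length ≤ cs.length - i := by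
            have := List.Sublist.length_le (List.takeWhile_sublist (l := cs.drop i)
              (p := fun d => !PySem.Chars.isspace d))
            rw [List.length_drop] at this
            exact this
          have htl1 : 1 ≤ ((cs.drop i).takeWhile (fun d => !PySem.Chars.isspace d)).length := by
            rw [htw]; simp
          rw [hw, ih cs (i + ((cs.drop i).takeWhile (fun d => !PySem.Chars.isspace d)).length) _
            (by omega) (by omega)]
          rw [hdrop, tokB_scan]
          split
          next heq =>
            rw [tokB_matchLen, if_neg hqc, if_neg hsp] at heq
            exact absurd heq (by simp)
          next len heq =>
            rw [tokB_matchLen, if_neg hqc, if_neg hsp] at heq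
            have hlen2 : len = ((cs.drop i).takeWhile (fun d => !PySem.Chars.isspace d)).length := by
              rw [htw, List.length_cons]
              simpa using heq.symm
            subst hlen2
            have htw2 : (cs.getD i ' ' :: cs.drop (i + 1)).takeWhile (fun d => !PySem.Chars.isspace d)
                = (cs.drop i).takeWhile (fun d => !PySem.Chars.isspace d) := by
              rw [hdrop]
            rw [htw2]
            rw [PySem.List.slice_natCast cs i
              (i + ((cs.drop i).takeWhile (fun d => !PySem.Chars.isspace d)).length)]
            rw [← hdrop, List.drop_drop]
            have h1 : i + ((cs.drop i).takeWhile (fun d => !PySem.Chars.isspace d)).length - i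
                = ((cs.drop i).takeWhile (fun d => !PySem.Chars.isspace d)).length := by omega
            rw [h1]
            simp
    · have hlen : i = cs.length := by omega
      rw [tokA_loop, dif_neg hlt, hlen, List.drop_length, tokB_scan]
      simp

-- ===== VERDICT (by name: the statement is the Claim_ definition above) =====
theorem tokenize_with_pos_py_spec : Claim_equal_tokenize_with_pos_py := by
  intro line _
  unfold Spec_tokenize_with_pos_py tokenize_with_pos_py tokenize_with_pos_py_alt
  simpa using loop_eq line.toList.length line.toList 0 [] (by omega) (by omega)
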